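-- pv_equiv track=rewrite | github.com/jvdheyden/jobwatch | scripts/discover/helpers.py | looks_like_job_link
-- ===== SOURCE A (Python) =====
-- def looks_like_job_link(text: str, href: str) -> bool:
--     combined = f"{text} {href}".lower()
--     patterns = (
--         "job",
--         "career",
--         "opening",
--         "position",
--         "apply",
--         "vacanc",
--         "role",
--         "engineer",
--         "research",
--         "security",
--         "privacy",
--         "crypt",
--     )
--     return any(pattern in combined for pattern in patterns)
-- ===== SOURCE B (Python) =====
-- PATTERNS = (
--     "job",
--     "career",
--     "opening",
--     "position",
--     "apply",
--     "vacanc",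
--     "role",
--     "engineer",
--     "research",
--     "security",
--     "privacy",
--     "crypt",
-- )
--
--
-- def looks_like_job_link(text: str, href: str) -> bool:
--     s = f"{text} {href}".lower()
--     # single left-to-right pass: at each position ask whether ANY keyword starts there
--     return any(s.startswith(PATTERNS, i) for i in range(len(s) + 1))
-- ===== Notes on version B (the rewrite author's own statement) =====
-- stated objective: alternative
-- what changed: Instead of one full substring scan per keyword (keyword-outer), B makes a single left-to-right pass over positions of the combined string and checks all keywords at each position via str.startswith with a tuple.
import Mathlib
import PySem

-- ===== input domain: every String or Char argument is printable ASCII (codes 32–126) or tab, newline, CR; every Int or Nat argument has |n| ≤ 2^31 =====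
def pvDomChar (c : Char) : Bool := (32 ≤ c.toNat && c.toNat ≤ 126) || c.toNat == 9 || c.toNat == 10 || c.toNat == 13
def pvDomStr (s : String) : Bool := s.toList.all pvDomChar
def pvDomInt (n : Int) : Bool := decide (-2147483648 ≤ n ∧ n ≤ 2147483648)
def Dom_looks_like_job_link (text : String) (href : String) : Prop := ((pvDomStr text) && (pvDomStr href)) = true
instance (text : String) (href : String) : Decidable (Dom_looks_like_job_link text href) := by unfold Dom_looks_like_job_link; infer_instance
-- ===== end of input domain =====

-- B makes one left-to-right pass over positions of the combined string, checking every
-- keyword at each position, instead of A's one full substring scan per keyword (alternative).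

-- ===== PORT A =====
-- the 'patterns' tuple of A (= PATTERNS of B), as lists of chars
def pvPatterns : List (List Char) :=
  ["job".toList, "career".toList, "opening".toList, "position".toList,
   "apply".toList, "vacanc".toList, "role".toList, "engineer".toList,
   "research".toList, "security".toList, "privacy".toList, "crypt".toList]

-- f"{text} {href}".lower(): exact as char-list concatenation with ' ' plus PySem.Chars.lower
def looks_like_job_link (text : String) (href : String) : Bool :=
  let combined := PySem.Chars.lower (text.toList ++ [' '] ++ href.toList)
  pvPatterns.any (fun pattern => PySem.Chars.isIn pattern combined)

-- ===== PORT B =====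
-- s.startswith(PATTERNS, i) for successive i: at each suffix, try every pattern as a prefix
def pvSearch (s : List Char) : Bool :=
  match s with
  | [] => pvPatterns.any (fun p => p.isPrefixOf [])
  | _ :: t => pvPatterns.any (fun p => p.isPrefixOf s) || pvSearch t

def looks_like_job_link_alt (text : String) (href : String) : Bool :=
  let s := PySem.Chars.lower (text.toList ++ [' '] ++ href.toList)
  pvSearch s

-- ===== PRECONDITION & SPEC =====
def Spec_looks_like_job_link (text : String) (href : String) (out : Bool) : Prop := out = looks_like_job_link_alt text href
instance (text : String) (href : String) (out : Bool) : Decidable (Spec_looks_like_job_link text href out) := by unfold Spec_looks_like_job_link; infer_instance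

-- ===== CLAIM (what is proved, stated in full; the proofs are below) =====
def Claim_equal_looks_like_job_link : Prop := ∀ (text : String) (href : String), Dom_looks_like_job_link text href → Spec_looks_like_job_link text href (looks_like_job_link text href)

-- ===== LEMMAS AND PROOFS =====
-- B's position-outer pass finds a match iff some pattern occurs as an infix,
-- which is exactly A's keyword-outer 'pattern in combined' disjunction.
theorem pvSearch_eq (s : List Char) :
    pvPatterns.any (fun pattern => PySem.Chars.isIn pattern s) = pvSearch s := by
  induction s with
  | nil =>
    rw [Bool.eq_iff_iff]
    simp [pvSearch, List.any_eq_true, PySem.Chars.isIn_iff_infix,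
      List.isPrefixOf_iff_prefix]
  | cons c t ih =>
    rw [Bool.eq_iff_iff]
    simp only [pvSearch, Bool.or_eq_true, ← ih, List.any_eq_true,
      PySem.Chars.isIn_iff_infix, List.isPrefixOf_iff_prefix, List.infix_cons_iff]
    constructor
    · rintro ⟨p, hp, h | h⟩
      · exact Or.inl ⟨p, hp, h⟩
      · exact Or.inr ⟨p, hp, h⟩
    · rintro (⟨p, hp, h⟩ | ⟨p, hp, h⟩)
      · exact ⟨p, hp, Or.inl h⟩
      · exact ⟨p, hp, Or.inr h⟩

-- ===== VERDICT (by name: the statement is the Claim_ definition above) =====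
theorem looks_like_job_link_spec : Claim_equal_looks_like_job_link := by
  intro text href _
  unfold Spec_looks_like_job_link looks_like_job_link looks_like_job_link_alt
  rw [pvSearch_eq]
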